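-- pv_equiv track=rewrite | github.com/mathusathiru/search-algorithm-visualiser | application/backend/test/test_brw.py | calculate_direction_bias
-- ===== SOURCE A (Python) =====
-- def calculate_direction_bias(positions, end):
--     "Helper function to calculate if movements tend toward the goal"
--     moves_toward_goal = 0
--     moves_away_from_goal = 0
--
--     for i in range(1, len(positions)):
--         prev_pos = positions[i-1]
--         curr_pos = positions[i]
--
--         prev_distance = abs(end[0] - prev_pos[0]) + abs(end[1] - prev_pos[1])
--         curr_distance = abs(end[0] - curr_pos[0]) + abs(end[1] - curr_pos[1])
--
--         if curr_distance < prev_distance: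
--             moves_toward_goal += 1
--         elif curr_distance > prev_distance:
--             moves_away_from_goal += 1
--
--     return moves_toward_goal, moves_away_from_goal
-- ===== SOURCE B (Python) =====
-- def calculate_direction_bias(positions, end):
--     "Helper function to calculate if movements tend toward the goal"
--     # Aggregate formulation: net = toward - away (sum of comparison signs),
--     # changes = toward + away (strict distance changes); recover both counts.
--     d = [abs(end[0] - x) + abs(end[1] - y) for x, y in positions]
--     net = sum((p > c) - (p < c) for p, c in zip(d, d[1:]))
--     changes = sum(p != c for p, c in zip(d, d[1:]))
--     return (changes + net) // 2, (changes - net) // 2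
-- ===== Notes on version B (the rewrite author's own statement) =====
-- stated objective: alternative
-- what changed: Instead of counting toward/away moves directly in a fused index loop that recomputes each distance twice, B builds the distance table once and computes two aggregates - the net bias (sum of comparison signs, toward minus away) and the number of strict distance changes (toward plus away) - then recovers the two counts by solving that 2x2 linear system: toward=(changes+net)//2, away=(changes-net)//2.
import Mathlib
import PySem

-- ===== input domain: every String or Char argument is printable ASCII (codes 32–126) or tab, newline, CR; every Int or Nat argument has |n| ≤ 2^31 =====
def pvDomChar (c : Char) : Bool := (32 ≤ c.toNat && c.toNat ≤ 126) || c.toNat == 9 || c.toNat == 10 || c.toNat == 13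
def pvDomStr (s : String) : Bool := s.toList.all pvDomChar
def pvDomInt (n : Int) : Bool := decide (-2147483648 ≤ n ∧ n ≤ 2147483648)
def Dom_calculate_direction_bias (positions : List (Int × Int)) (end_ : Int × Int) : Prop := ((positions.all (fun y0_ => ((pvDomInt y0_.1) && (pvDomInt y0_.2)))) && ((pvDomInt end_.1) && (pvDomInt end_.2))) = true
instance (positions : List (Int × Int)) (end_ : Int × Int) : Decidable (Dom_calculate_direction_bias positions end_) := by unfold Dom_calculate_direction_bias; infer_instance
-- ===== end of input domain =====

-- B replaces A's fused counting loop by two aggregates (net sign sum, strict-change count)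
-- from a once-built distance table, recovering toward/away arithmetically (objective: alternative).

-- ===== PORT A =====
-- literal transliteration of A: fused index loop over range(1, len(positions)),
-- recomputing both distances at each step
def calculate_direction_bias (positions : List (Int × Int)) (end_ : Int × Int) : Int × Int :=
  (PySem.List.pyRange 1 (PySem.List.len positions) 1).foldl
    (fun (acc : Int × Int) i =>
      let prev_pos := PySem.List.pyGetD positions (i - 1) (0, 0)
      let curr_pos := PySem.List.pyGetD positions i (0, 0)
      let prev_distance := |end_.1 - prev_pos.1| + |end_.2 - prev_pos.2|
      let curr_distance := |end_.1 - curr_pos.1| + |end_.2 - curr_pos.2|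
      if curr_distance < prev_distance then (acc.1 + 1, acc.2)
      else if curr_distance > prev_distance then (acc.1, acc.2 + 1)
      else acc)
    (0, 0)

-- ===== PORT B =====
-- B: distance table built once, then aggregates net = toward - away and
-- changes = toward + away over zip(d, d[1:]); counts recovered by // 2
def calculate_direction_bias_alt (positions : List (Int × Int)) (end_ : Int × Int) : Int × Int :=
  let d := positions.map (fun p => |end_.1 - p.1| + |end_.2 - p.2|)
  let pairs := d.zip d.tail
  let net := (pairs.map (fun pc => (if pc.1 > pc.2 then (1 : Int) else 0) - (if pc.1 < pc.2 then (1 : Int) else 0))).sum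
  let changes := (pairs.map (fun pc => if pc.1 ≠ pc.2 then (1 : Int) else 0)).sum
  (PySem.Int.floordiv (changes + net) 2, PySem.Int.floordiv (changes - net) 2)

-- ===== PRECONDITION & SPEC =====
def Spec_calculate_direction_bias (positions : List (Int × Int)) (end_ : Int × Int) (out : Int × Int) : Prop := out = calculate_direction_bias_alt positions end_
instance (positions : List (Int × Int)) (end_ : Int × Int) (out : Int × Int) : Decidable (Spec_calculate_direction_bias positions end_ out) := by unfold Spec_calculate_direction_bias; infer_instance

-- ===== CLAIM (what is proved, stated in full; the proofs are below) =====
def Claim_equal_calculate_direction_bias : Prop := ∀ (positions : List (Int × Int)) (end_ : Int × Int), Dom_calculate_direction_bias positions end_ → Spec_calculate_direction_bias positions end_ (calculate_direction_bias positions end_)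

-- ===== LEMMAS AND PROOFS =====

-- core loop lemma: the index fold over List.range (len-1) reading xs[k], xs[k+1]
-- equals the zip-pair counts, for any accumulator
theorem cdb_core (f : Int × Int → Int) :
    ∀ (xs : List (Int × Int)) (a b : Int),
    (List.range (xs.length - 1)).foldl
      (fun (acc : Int × Int) k =>
        let pd := f (xs.getD k (0, 0))
        let cd := f (xs.getD (k + 1) (0, 0))
        if cd < pd then (acc.1 + 1, acc.2)
        else if cd > pd then (acc.1, acc.2 + 1)
        else acc) (a, b)
    = (a + (((xs.map f).zip (xs.map f).tail).countP (fun pc => pc.2 < pc.1) : Int),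
       b + (((xs.map f).zip (xs.map f).tail).countP (fun pc => pc.1 < pc.2) : Int)) := by
  intro xs
  induction xs with
  | nil => intro a b; simp
  | cons p t ih =>
    match t with
    | [] => intro a b; simp
    | c :: rest =>
      intro a b
      have hlen : (p :: c :: rest).length - 1 = ((c :: rest).length - 1) + 1 := by
        simp [List.length_cons]
      rw [hlen, List.range_succ_eq_map]
      simp only [List.foldl_cons, List.foldl_map, List.getD_cons_succ, List.getD_cons_zero,
        List.map_cons, List.zip_cons_cons, List.tail_cons, List.countP_cons, gt_iff_lt]
      by_cases h1 : f c < f p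
      · rw [if_pos h1]
        have := ih (a + 1) b
        simp only [List.getD_cons_succ, gt_iff_lt] at this
        rw [this]
        simp [h1, not_lt.mpr h1.le, Prod.ext_iff]
        omega
      · by_cases h2 : f p < f c
        · rw [if_neg h1, if_pos h2]
          have := ih a (b + 1)
          simp only [List.getD_cons_succ, gt_iff_lt] at this
          rw [this]
          simp [h1, h2, Prod.ext_iff]
          omega
        · rw [if_neg h1, if_neg h2]
          have := ih a b
          simp only [List.getD_cons_succ, gt_iff_lt] at this
          rw [this]
          simp [h1, h2]

-- aggregates over a pair list equal difference and sum of the two counts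
theorem cdb_net (l : List (Int × Int)) :
    (l.map (fun pc => (if pc.1 > pc.2 then (1 : Int) else 0) - (if pc.1 < pc.2 then (1 : Int) else 0))).sum
      = (l.countP (fun pc => pc.2 < pc.1) : Int) - (l.countP (fun pc => pc.1 < pc.2) : Int) := by
  induction l with
  | nil => simp
  | cons x t ih =>
    simp only [List.map_cons, List.sum_cons, List.countP_cons, ih, gt_iff_lt,
      decide_eq_true_eq]
    push_cast
    split_ifs <;> omega

theorem cdb_changes (l : List (Int × Int)) :
    (l.map (fun pc => if pc.1 ≠ pc.2 then (1 : Int) else 0)).sum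
      = (l.countP (fun pc => pc.2 < pc.1) : Int) + (l.countP (fun pc => pc.1 < pc.2) : Int) := by
  induction l with
  | nil => simp
  | cons x t ih =>
    simp only [List.map_cons, List.sum_cons, List.countP_cons, ih, ne_eq,
      decide_eq_true_eq]
    push_cast
    split_ifs <;> omega

-- ===== VERDICT (by name: the statement is the Claim_ definition above) =====
theorem calculate_direction_bias_spec : Claim_equal_calculate_direction_bias := by
  intro positions end_ _
  unfold Spec_calculate_direction_bias calculate_direction_bias calculate_direction_bias_alt
  rw [PySem.List.pyRange_one, PySem.List.len_eq]
  have harg : ((positions.length : Int) - 1).toNat = positions.length - 1 := by omega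
  rw [harg, List.foldl_map]
  set f : Int × Int → Int := fun p => |end_.1 - p.1| + |end_.2 - p.2| with hf
  have h := cdb_core f positions 0 0
  simp only [zero_add] at h
  have e2 : ∀ k : Nat, (1 : Int) + (k : Int) = (((k + 1 : Nat)) : Int) := by
    intro k; push_cast; ring
  have e3 : ∀ k : Nat, (((k + 1 : Nat)) : Int) - 1 = ((k : Nat) : Int) := by
    intro k; push_cast; ring
  simp only [e2, e3, PySem.List.pyGetD_natCast]
  rw [show (positions.map f) = positions.map (fun p => |end_.1 - p.1| + |end_.2 - p.2|) from rfl] at h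
  rw [h]
  rw [cdb_net, cdb_changes]
  set T : Int := ((((positions.map (fun p => |end_.1 - p.1| + |end_.2 - p.2|)).zip (positions.map (fun p => |end_.1 - p.1| + |end_.2 - p.2|)).tail).countP (fun pc => pc.2 < pc.1) : Nat) : Int)
  set A : Int := ((((positions.map (fun p => |end_.1 - p.1| + |end_.2 - p.2|)).zip (positions.map (fun p => |end_.1 - p.1| + |end_.2 - p.2|)).tail).countP (fun pc => pc.1 < pc.2) : Nat) : Int)
  rw [PySem.Int.floordiv_eq_ediv_of_pos (by omega), PySem.Int.floordiv_eq_ediv_of_pos (by omega),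
    Prod.mk.injEq]
  constructor <;> omega
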